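-- pv_equiv track=rewrite | github.com/110w110/Algorithm | Data Structure/pno131127.py | solution
-- ===== SOURCE A (Python) =====
-- from collections import Counter
--
-- def solution(want, number, discount):
--     answer = 0
--     cwant = []
--     for i in range(len(want)):
--         cwant += [want[i]] * number[i]
--     cwant = Counter(cwant)
--
--     for i in range(len(discount) - 9):
--         flag = False
--         temp = Counter(discount[i:i + 10])
--         for x in cwant:
--             if x not in temp:
--                 flag = True
--                 break
--             elif temp[x] < cwant[x]:
--                 flag = True
--                 break
--
--         if flag == False:
--             answer += 1
--
--     return answer
-- ===== SOURCE B (Python) =====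
-- def solution(want, number, discount):
--     # O(n + k) sliding window: incremental window counts and a satisfied-keys counter.
--     need = {}
--     for w, n in zip(want, number):
--         if n > 0:
--             need[w] = need.get(w, 0) + n
--     k = len(need)
--     if len(discount) < 10:
--         return 0
--     wc = {}
--     satisfied = 0
--     for w in discount[:10]:
--         if w in need:
--             wc[w] = wc.get(w, 0) + 1
--             if wc[w] == need[w]:
--                 satisfied += 1
--     answer = 1 if satisfied == k else 0
--     for j in range(10, len(discount)):
--         out = discount[j - 10]
--         if out in need:
--             if wc[out] == need[out]:
--                 satisfied -= 1
--             wc[out] -= 1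
--         win = discount[j]
--         if win in need:
--             wc[win] = wc.get(win, 0) + 1
--             if wc[win] == need[win]:
--                 satisfied += 1
--         if satisfied == k:
--             answer += 1
--     return answer
-- ===== Notes on version B (the rewrite author's own statement) =====
-- stated objective: faster
-- what changed: Instead of materializing the wanted multiset as an expanded list and rebuilding a Counter of every 10-item slice, B builds the requirement dict in one pass over zip(want, number) and slides a 10-item window over discount, updating per-item counts and a satisfied-keys counter incrementally in O(1) per step.
import Mathlib
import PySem

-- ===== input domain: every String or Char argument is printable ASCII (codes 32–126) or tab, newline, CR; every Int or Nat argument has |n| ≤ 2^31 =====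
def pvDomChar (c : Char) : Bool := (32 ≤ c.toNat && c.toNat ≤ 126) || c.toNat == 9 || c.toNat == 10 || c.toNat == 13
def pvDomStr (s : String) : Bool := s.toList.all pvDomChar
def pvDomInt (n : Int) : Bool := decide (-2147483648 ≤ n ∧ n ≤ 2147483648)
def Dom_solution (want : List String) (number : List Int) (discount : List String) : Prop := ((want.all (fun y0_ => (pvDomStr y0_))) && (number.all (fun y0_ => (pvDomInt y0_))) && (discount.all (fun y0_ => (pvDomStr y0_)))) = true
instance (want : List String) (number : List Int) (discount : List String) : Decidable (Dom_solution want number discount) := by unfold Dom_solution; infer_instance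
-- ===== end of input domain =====

-- B replaces A's expanded-list Counter and per-window slice Counters by a one-pass
-- requirement dict and an O(1)-per-step sliding window (incremental counts + satisfied-keys
-- counter); objective: faster.

-- ===== PORT A =====
-- 'for x in cwant: if x not in temp: flag=True; break; elif temp[x] < cwant[x]: flag=True; break'
def aFlagLoop (cwant temp : PySem.Dict String Int) : List String → Bool
  | [] => false
  | x :: rest =>
    if temp.contains x = false then true
    else if temp.getD x 0 < cwant.getD x 0 then true
    else aFlagLoop cwant temp rest

def solution (want : List String) (number : List Int) (discount : List String) : Int :=
  let answer : Int := 0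
  -- cwant += [want[i]] * number[i] ; i ranges over range(len(want)), so want[i] is always in
  -- range and number[i] is in range exactly on Pre_solution (the pyGetD defaults are never used there)
  let cwantList : List String :=
    (PySem.List.pyRange 0 (want.length : Int) 1).foldl
      (fun acc i => acc ++ PySem.List.pyRepeat [PySem.List.pyGetD want i ""] (PySem.List.pyGetD number i 0)) []
  let cwant : PySem.Dict String Int := PySem.Dict.counter cwantList
  (PySem.List.pyRange 0 ((discount.length : Int) - 9) 1).foldl
    (fun answer i =>
      let temp : PySem.Dict String Int :=
        PySem.Dict.counter (PySem.List.slice discount (some i) (some (i + 10)))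
      let flag := aFlagLoop cwant temp cwant.keys
      if flag = false then answer + 1 else answer) answer

-- ===== PORT B =====
-- need[w] = need.get(w, 0) + n  for (w, n) in zip(want, number) with n > 0
def bNeed (want : List String) (number : List Int) : PySem.Dict String Int :=
  (want.zip number).foldl
    (fun d p => if 0 < p.2 then d.insert p.1 (d.getD p.1 0 + p.2) else d) PySem.Dict.empty

-- first window: count w into wc, bump satisfied when a key reaches its requirement
def bFirst (need : PySem.Dict String Int) (s : PySem.Dict String Int × Int) (w : String) :
    PySem.Dict String Int × Int :=
  if need.contains w then
    let wc := s.1.insert w (s.1.getD w 0 + 1)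
    (wc, if wc.getD w 0 = need.getD w 0 then s.2 + 1 else s.2)
  else s

-- slide: drop discount[j-10], add discount[j], keep satisfied and answer up to date
-- (both indices are in range for every j in range(10, len(discount)); defaults never used)
def bStep (need : PySem.Dict String Int) (discount : List String)
    (s : PySem.Dict String Int × Int × Int) (j : Int) : PySem.Dict String Int × Int × Int :=
  let out := PySem.List.pyGetD discount (j - 10) ""
  let s1 : PySem.Dict String Int × Int :=
    if need.contains out then
      (s.1.insert out (s.1.getD out 0 - 1),
       if s.1.getD out 0 = need.getD out 0 then s.2.1 - 1 else s.2.1)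
    else (s.1, s.2.1)
  let win := PySem.List.pyGetD discount j ""
  let s2 : PySem.Dict String Int × Int :=
    if need.contains win then
      let wc := s1.1.insert win (s1.1.getD win 0 + 1)
      (wc, if wc.getD win 0 = need.getD win 0 then s1.2 + 1 else s1.2)
    else s1
  (s2.1, s2.2, if s2.2 = (need.size : Int) then s.2.2 + 1 else s.2.2)

def solution_alt (want : List String) (number : List Int) (discount : List String) : Int :=
  let need := bNeed want number
  let k : Int := need.size
  if (discount.length : Int) < 10 then 0
  else
    let s0 := (PySem.List.slice discount none (some 10)).foldl (bFirst need) (PySem.Dict.empty, 0)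
    let answer : Int := if s0.2 = k then 1 else 0
    let res := (PySem.List.pyRange 10 (discount.length : Int) 1).foldl (bStep need discount)
      (s0.1, s0.2, answer)
    res.2.2

-- ===== PRECONDITION & SPEC =====
-- A indexes number[i] for every i < len(want): it raises IndexError iff number is shorter than want.
def Pre_solution (want : List String) (number : List Int) (discount : List String) : Prop :=
  want.length ≤ number.length
instance (want : List String) (number : List Int) (discount : List String) : Decidable (Pre_solution want number discount) := by unfold Pre_solution; infer_instance

def pvWitness_solution : List String × List Int × List String :=
  (["a"], [2], ["a", "b", "a", "c", "a", "a", "a", "a", "a", "a", "b"])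

def Spec_solution (want : List String) (number : List Int) (discount : List String) (out : Int) : Prop := out = solution_alt want number discount
instance (want : List String) (number : List Int) (discount : List String) (out : Int) : Decidable (Spec_solution want number discount out) := by unfold Spec_solution; infer_instance

-- ===== CLAIM (what is proved, stated in full; the proofs are below) =====
def Claim_equal_solution : Prop := ∀ (want : List String) (number : List Int) (discount : List String), Dom_solution want number discount → Pre_solution want number discount → Spec_solution want number discount (solution want number discount)


-- ===== LEMMAS AND PROOFS =====

-- per-window count of x (as Int) and the per-window "all requirements met" test
def wcnt (discount : List String) (k : Nat) (x : String) : Int :=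
  (((discount.drop k).take 10).count x : Int)

def okW (need : PySem.Dict String Int) (discount : List String) (k : Nat) : Bool :=
  need.keys.all fun x => decide (need.getD x 0 ≤ wcnt discount k x)

theorem countP_flip (l : List String) (hnd : l.Nodup) (w : String) (P Q : String → Bool)
    (h : ∀ x ∈ l, x ≠ w → P x = Q x) :
    (l.countP Q : Int) = l.countP P +
      (if w ∈ l then (if Q w then (1:Int) else 0) - (if P w then (1:Int) else 0) else 0) := by
  induction l with
  | nil => simp
  | cons a t ih =>
    rcases List.nodup_cons.mp hnd with ⟨ha, ht⟩
    by_cases haw : a = w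
    · subst haw
      have : ∀ x ∈ t, P x = Q x := fun x hx => h x (List.mem_cons_of_mem _ hx) (fun e => ha (e ▸ hx))
      have hc : t.countP P = t.countP Q := List.countP_congr (fun x hx => by rw [this x hx])
      by_cases hq : Q a <;> by_cases hp : P a <;>
        simp [List.countP_cons, hc, hq, hp] <;> omega
    · have hPQ : P a = Q a := h a List.mem_cons_self haw
      have ih' := ih ht (fun x hx hxw => h x (List.mem_cons_of_mem _ hx) hxw)
      simp [List.countP_cons, ← hPQ, List.mem_cons, Ne.symm haw]
      by_cases hp : P a <;> simp [hp] <;> omega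

theorem wcnt_succ (d : List String) (i : Nat) (h : i + 10 < d.length) (x : String) :
    (((d.drop (i+1)).take 10).count x : Int) =
      ((d.drop i).take 10).count x - (if d[i]'(by omega) = x then 1 else 0)
        + (if d[i+10]'(by omega) = x then 1 else 0) := by
  have h1 : d.drop i = d[i]'(by omega) :: d.drop (i+1) := List.drop_eq_getElem_cons (by omega)
  have h2 : (d.drop i).take 11 = (d.drop i).take 10 ++ ((d.drop i)[10]?).toList := List.take_add_one
  have h3 : (d.drop i)[10]? = some (d[i+10]'(by omega)) := by
    rw [List.getElem?_drop]; exact List.getElem?_eq_getElem (by omega)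
  rw [h3] at h2
  have h4 : (d.drop i).take 11 = d[i]'(by omega) :: (d.drop (i+1)).take 10 := by
    rw [h1]; rfl
  have := congrArg (List.count x) (h4.symm.trans h2)
  simp [List.count_cons, List.count_append] at this
  by_cases e1 : d[i]'(by omega) = x <;> by_cases e2 : d[i+10]'(by omega) = x <;>
    simp [e1, e2] at this ⊢ <;> omega

theorem flatMap_range_getD (l : List (String × Int)) (g : String × Int → List String) :
    (List.range l.length).flatMap (fun k => g (l.getD k ("", 0))) = l.flatMap g := by
  induction l with
  | nil => simp
  | cons a t ih =>
    rw [List.length_cons, List.range_succ_eq_map, List.flatMap_cons, List.flatMap_map,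
      List.flatMap_cons]
    simp only [List.getD_cons_zero, List.getD_cons_succ]
    rw [ih]

theorem expand_eq (w : List String) (n : List Int) (h : w.length ≤ n.length) :
    (PySem.List.pyRange 0 (w.length : Int) 1).foldl
      (fun acc i => acc ++ PySem.List.pyRepeat [PySem.List.pyGetD w i ""] (PySem.List.pyGetD n i 0)) []
    = (w.zip n).flatMap (fun p => List.replicate p.2.toNat p.1) := by
  have hz : (w.zip n).length = w.length := by
    rw [List.length_zip]; omega
  rw [PySem.List.foldl_append_eq_flatMap, List.nil_append, PySem.List.pyRange_one,
    List.flatMap_map]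
  simp only [Int.sub_zero, Int.toNat_natCast]
  rw [← hz, ← flatMap_range_getD ((w.zip n)) (fun p => List.replicate p.2.toNat p.1)]
  apply List.flatMap_congr
  intro k hk
  have hk' : k < (w.zip n).length := List.mem_range.mp hk
  have hkw : k < w.length := by omega
  have hkn : k < n.length := by omega
  rw [PySem.List.pyRepeat_singleton]
  rw [show ((0:Int) + (k:Int)) = ((k:Nat):Int) by omega]
  rw [PySem.List.pyGetD_natCast, PySem.List.pyGetD_natCast]
  rw [List.getD_eq_getElem w "" hkw, List.getD_eq_getElem n 0 hkn,
    List.getD_eq_getElem _ _ hk', List.getElem_zip]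

theorem foldl_cins_replicate (d : PySem.Dict String Int) (x : String) (k : Nat) :
    (List.replicate k x).foldl (fun d y => d.insert y (d.getD y 0 + 1)) d =
      if 0 < k then d.insert x (d.getD x 0 + (k : Int)) else d := by
  induction k generalizing d with
  | zero => simp
  | succ k ih =>
    rw [List.replicate_succ, List.foldl_cons, ih]
    by_cases hk : 0 < k
    · rw [if_pos hk, if_pos (Nat.succ_pos k), PySem.Dict.getD_insert_self,
        PySem.Dict.insert_insert_self]
      congr 1; push_cast; ring
    · have : k = 0 := by omega
      subst this; simp

theorem fold_cins_flatMap (ps : List (String × Int)) (d : PySem.Dict String Int) :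
    ((ps.flatMap fun p => List.replicate p.2.toNat p.1).foldl
        (fun d y => d.insert y (d.getD y 0 + 1)) d) =
      ps.foldl (fun d p => if 0 < p.2 then d.insert p.1 (d.getD p.1 0 + p.2) else d) d := by
  induction ps generalizing d with
  | nil => simp
  | cons p t ih =>
    rw [List.flatMap_cons, List.foldl_append, List.foldl_cons, foldl_cins_replicate, ih]
    congr 1
    by_cases hp : 0 < p.2
    · rw [if_pos (by omega : 0 < p.2.toNat), if_pos hp, Int.toNat_of_nonneg (le_of_lt hp)]
    · rw [if_neg (by omega : ¬ 0 < p.2.toNat), if_neg hp]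



theorem bNeed_nodup (want : List String) (number : List Int) : (bNeed want number).keys.Nodup := by
  unfold bNeed
  rw [PySem.List.foldl_ite_eq_foldl_filter (fun p : String × Int => 0 < p.2)
    (fun d p => d.insert p.1 (d.getD p.1 0 + p.2)) (want.zip number) PySem.Dict.empty]
  exact PySem.Dict.nodup_keys_foldl_insert_key _ Prod.fst _ _ PySem.Dict.nodup_keys_empty

theorem items_pos (ps : List (String × Int)) (d : PySem.Dict String Int)
    (hps : ∀ p ∈ ps, 0 < p.2) (hd : ∀ q ∈ d.items, 1 ≤ q.2) :
    ∀ q ∈ (ps.foldl (fun d p => d.insert p.1 (d.getD p.1 0 + p.2)) d).items, 1 ≤ q.2 := by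
  induction ps generalizing d with
  | nil => simpa using hd
  | cons p t ih =>
    rw [List.foldl_cons]
    apply ih
    · exact fun q hq => hps q (List.mem_cons_of_mem _ hq)
    · intro q hq
      rcases (PySem.Dict.mem_items_insert d p.1 _ q).mp hq with h | ⟨h, _⟩
      · subst h
        have hp2 : 0 < p.2 := hps p List.mem_cons_self
        have hge : 0 ≤ d.getD p.1 0 := by
          rw [PySem.Dict.getD_eq_get?_getD]
          cases hg : d.get? p.1 with
          | none => simp
          | some v =>
            have := hd (p.1, v) (PySem.Dict.mem_items_of_get?_eq_some d hg)
            simpa using by omega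
        simpa using by omega
      · exact hd q h

theorem bNeed_pos (want : List String) (number : List Int) :
    ∀ x, (bNeed want number).contains x = true → 1 ≤ (bNeed want number).getD x 0 := by
  intro x hx
  have hall : ∀ q ∈ (bNeed want number).items, 1 ≤ q.2 := by
    unfold bNeed
    rw [PySem.List.foldl_ite_eq_foldl_filter (fun p : String × Int => 0 < p.2)
      (fun d p => d.insert p.1 (d.getD p.1 0 + p.2)) (want.zip number) PySem.Dict.empty]
    apply items_pos
    · intro p hp
      have := List.of_mem_filter hp
      simpa using this
    · intro q hq; simp [PySem.Dict.empty, PySem.Dict.items] at hq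
  rw [PySem.Dict.contains_eq_isSome_get?] at hx
  cases hg : (bNeed want number).get? x with
  | none => rw [hg] at hx; simp at hx
  | some v =>
    rw [PySem.Dict.getD_eq_get?_getD, hg]
    simpa using hall (x, v) (PySem.Dict.mem_items_of_get?_eq_some _ hg)



theorem aFlagLoop_eq_false_iff (cw temp : PySem.Dict String Int) (l : List String) :
    aFlagLoop cw temp l = false ↔
      ∀ x ∈ l, temp.contains x = true ∧ cw.getD x 0 ≤ temp.getD x 0 := by
  induction l with
  | nil => simp [aFlagLoop]
  | cons a t ih =>
    by_cases hc : temp.contains a = true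
    · by_cases hlt : temp.getD a 0 < cw.getD a 0
      · rw [show aFlagLoop cw temp (a :: t) = true by simp [aFlagLoop, hc, hlt]]
        simp only [Bool.true_eq_false, false_iff]
        intro h
        have := h a List.mem_cons_self
        omega
      · rw [show aFlagLoop cw temp (a :: t) = aFlagLoop cw temp t by
          simp [aFlagLoop, hc, hlt]]
        rw [ih]
        constructor
        · intro h x hx
          rcases List.mem_cons.mp hx with rfl | hx'
          · exact ⟨hc, by omega⟩
          · exact h x hx'
        · intro h x hx
          exact h x (List.mem_cons_of_mem _ hx)
    · rw [show aFlagLoop cw temp (a :: t) = true by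
        simp [aFlagLoop, Bool.not_eq_true] at hc ⊢; simp [hc]]
      simp only [Bool.true_eq_false, false_iff]
      intro h
      exact hc (h a List.mem_cons_self).1

theorem solution_eq (want : List String) (number : List Int) (discount : List String)
    (h : want.length ≤ number.length) :
    solution want number discount =
      ((List.range (((discount.length : Int) - 9).toNat)).countP
        (okW (bNeed want number) discount) : Int) := by
  unfold solution
  dsimp only
  rw [expand_eq want number h]
  rw [← PySem.Dict.foldl_insert_getD_add_one_eq_counter, fold_cins_flatMap]
  rw [show (List.foldl (fun d p => if 0 < p.2 then d.insert p.1 (d.getD p.1 0 + p.2) else d)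
      PySem.Dict.empty (want.zip number)) = bNeed want number from rfl]
  set need := bNeed want number with hneed
  rw [PySem.List.foldl_ite_add_one
    (fun i => aFlagLoop need (PySem.Dict.counter (PySem.List.slice discount (some i) (some (i+10)))) need.keys = false)]
  rw [Int.zero_add, PySem.List.pyRange_one, List.countP_map]
  rw [show ((discount.length:Int) - 9 - 0) = (discount.length:Int) - 9 by ring]
  congr 1
  apply List.countP_congr
  intro k hk
  simp only [Function.comp_apply, decide_eq_true_eq]
  have hwin : PySem.List.slice discount (some ((0:Int) + (k:Int))) (some ((0:Int) + (k:Int) + 10))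
      = (discount.drop k).take 10 := by
    have := PySem.List.slice_natCast_add discount k 10
    push_cast at this ⊢
    simpa using this
  rw [hwin, aFlagLoop_eq_false_iff]
  rw [okW, List.all_eq_true]
  constructor
  · intro hall x hx
    rcases hall x hx with ⟨_, hle⟩
    rw [PySem.Dict.getD_counter] at hle
    simp only [decide_eq_true_eq]
    exact hle
  · intro hall x hx
    have hle := hall x hx
    simp only [decide_eq_true_eq] at hle
    have hpos := bNeed_pos want number x ((PySem.Dict.contains_iff_mem_keys _ x).mpr hx)
    rw [← hneed] at hpos
    refine ⟨?_, by rw [PySem.Dict.getD_counter]; exact hle⟩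
    rw [PySem.Dict.contains_counter, List.contains_iff_mem]
    rw [← List.count_pos_iff (a := x)]
    unfold wcnt at hle
    omega

-- one element enters the window: wc and satisfied stay in sync with the counts c
theorem sat_add (need : PySem.Dict String Int) (hnd : need.keys.Nodup) (c : String → Int)
    (w : String) (wc : PySem.Dict String Int) (sat : Int)
    (hc : ∀ x, need.contains x = true → wc.getD x 0 = c x)
    (hs : sat = ↑(need.keys.countP fun x => decide (need.getD x 0 ≤ c x)))
    (s' : PySem.Dict String Int × Int)
    (hdef : s' = if need.contains w then
        (wc.insert w (wc.getD w 0 + 1),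
         if (wc.insert w (wc.getD w 0 + 1)).getD w 0 = need.getD w 0 then sat + 1 else sat)
      else (wc, sat)) :
    (∀ x, need.contains x = true → s'.1.getD x 0 = c x + (if w = x then 1 else 0)) ∧
    s'.2 = ↑(need.keys.countP fun x => decide (need.getD x 0 ≤ c x + (if w = x then 1 else 0))) := by
  by_cases hw : need.contains w = true
  · rw [hdef, if_pos hw]
    dsimp only
    constructor
    · intro x hx
      rw [PySem.Dict.getD_insert]
      by_cases hxw : x = w
      · subst hxw; rw [if_pos rfl, if_pos rfl, hc x hx]
      · rw [if_neg hxw, if_neg (fun e => hxw e.symm), hc x hx, add_zero]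
    · have hflip := countP_flip need.keys hnd w
        (fun x => decide (need.getD x 0 ≤ c x))
        (fun x => decide (need.getD x 0 ≤ c x + (if w = x then 1 else 0)))
        (fun x _ hxw => by simp only [if_neg (fun e : w = x => hxw e.symm), add_zero])
      have hwmem : w ∈ need.keys := (PySem.Dict.contains_iff_mem_keys _ w).mp hw
      rw [if_pos hwmem] at hflip
      simp only [PySem.Dict.getD_insert_self, hc w hw]
      rw [hflip, ← hs]
      by_cases h1 : c w + 1 = need.getD w 0 <;>
        by_cases h2 : need.getD w 0 ≤ c w <;>
          simp [h1, h2, if_pos rfl] <;> omega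
  · rw [hdef, if_neg hw]
    dsimp only
    constructor
    · intro x hx
      have hxw : ¬ (w = x) := fun e => hw (e ▸ hx)
      rw [if_neg hxw, add_zero]
      exact hc x hx
    · rw [hs]
      congr 1
      apply List.countP_congr
      intro x hx
      have hxc : need.contains x = true := (PySem.Dict.contains_iff_mem_keys _ x).mpr hx
      have hxw : ¬ (w = x) := fun e => hw (e ▸ hxc)
      rw [if_neg hxw, add_zero]

-- one element leaves the window
theorem sat_sub (need : PySem.Dict String Int) (hnd : need.keys.Nodup) (c : String → Int)
    (w : String) (wc : PySem.Dict String Int) (sat : Int)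
    (hc : ∀ x, need.contains x = true → wc.getD x 0 = c x)
    (hs : sat = ↑(need.keys.countP fun x => decide (need.getD x 0 ≤ c x)))
    (s' : PySem.Dict String Int × Int)
    (hdef : s' = if need.contains w then
        (wc.insert w (wc.getD w 0 - 1),
         if wc.getD w 0 = need.getD w 0 then sat - 1 else sat)
      else (wc, sat)) :
    (∀ x, need.contains x = true → s'.1.getD x 0 = c x - (if w = x then 1 else 0)) ∧
    s'.2 = ↑(need.keys.countP fun x => decide (need.getD x 0 ≤ c x - (if w = x then 1 else 0))) := by
  by_cases hw : need.contains w = true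
  · rw [hdef, if_pos hw]
    dsimp only
    constructor
    · intro x hx
      rw [PySem.Dict.getD_insert]
      by_cases hxw : x = w
      · subst hxw; rw [if_pos rfl, if_pos rfl, hc x hx]
      · rw [if_neg hxw, if_neg (fun e => hxw e.symm), hc x hx, sub_zero]
    · have hflip := countP_flip need.keys hnd w
        (fun x => decide (need.getD x 0 ≤ c x))
        (fun x => decide (need.getD x 0 ≤ c x - (if w = x then 1 else 0)))
        (fun x _ hxw => by simp only [if_neg (fun e : w = x => hxw e.symm), sub_zero])
      have hwmem : w ∈ need.keys := (PySem.Dict.contains_iff_mem_keys _ w).mp hw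
      rw [if_pos hwmem] at hflip
      simp only [hc w hw]
      rw [hflip, ← hs]
      by_cases h1 : c w = need.getD w 0 <;>
        by_cases h2 : need.getD w 0 ≤ c w - 1 <;>
          simp [h1, h2, if_pos rfl] <;> omega
  · rw [hdef, if_neg hw]
    dsimp only
    constructor
    · intro x hx
      have hxw : ¬ (w = x) := fun e => hw (e ▸ hx)
      rw [if_neg hxw, sub_zero]
      exact hc x hx
    · rw [hs]
      congr 1
      apply List.countP_congr
      intro x hx
      have hxc : need.contains x = true := (PySem.Dict.contains_iff_mem_keys _ x).mpr hx
      have hxw : ¬ (w = x) := fun e => hw (e ▸ hxc)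
      rw [if_neg hxw, sub_zero]

theorem sat_size_iff (need : PySem.Dict String Int) (discount : List String) (k : Nat) :
    ((need.keys.countP fun x => decide (need.getD x 0 ≤ wcnt discount k x)) : Int) = (need.size : Int)
      ↔ okW need discount k = true := by
  have hsize : need.size = need.keys.length := by
    simp [PySem.Dict.size, PySem.Dict.keys]
  rw [hsize, Int.natCast_inj, List.countP_eq_length, okW, List.all_eq_true]

theorem bFirst_inv (need : PySem.Dict String Int) (hnd : need.keys.Nodup)
    (l : List String) : ∀ (pref : List String) (wc : PySem.Dict String Int) (sat : Int),
    (∀ x, need.contains x = true → wc.getD x 0 = (pref.count x : Int)) →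
    sat = ↑(need.keys.countP fun x => decide (need.getD x 0 ≤ (pref.count x : Int))) →
    (∀ x, need.contains x = true →
      (l.foldl (bFirst need) (wc, sat)).1.getD x 0 = ((pref ++ l).count x : Int)) ∧
    (l.foldl (bFirst need) (wc, sat)).2 =
      ↑(need.keys.countP fun x => decide (need.getD x 0 ≤ ((pref ++ l).count x : Int))) := by
  induction l with
  | nil => intro pref wc sat hc hs; simpa using ⟨hc, hs⟩
  | cons w t ih =>
    intro pref wc sat hc hs
    rw [List.foldl_cons]
    have hadd := sat_add need hnd (fun x => (pref.count x : Int)) w wc sat hc hs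
      (bFirst need (wc, sat) w) (by unfold bFirst; rfl)
    have hcount : ∀ x, (pref.count x : Int) + (if w = x then 1 else 0)
        = ((pref ++ [w]).count x : Int) := by
      intro x
      rw [List.count_append]
      by_cases hwx : w = x
      · subst hwx; simp
      · simp [List.count_singleton, hwx, Ne.symm hwx]
    have hc' : ∀ x, need.contains x = true →
        (bFirst need (wc, sat) w).1.getD x 0 = ((pref ++ [w]).count x : Int) := by
      intro x hx; rw [hadd.1 x hx, hcount x]
    have hs' : (bFirst need (wc, sat) w).2 =
        ↑(need.keys.countP fun x => decide (need.getD x 0 ≤ ((pref ++ [w]).count x : Int))) := by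
      rw [hadd.2]; congr 1; apply List.countP_congr; intro x _
      rw [hcount x]
    have := ih (pref ++ [w]) (bFirst need (wc, sat) w).1 (bFirst need (wc, sat) w).2 hc' hs'
    rw [show ((bFirst need (wc, sat) w).1, (bFirst need (wc, sat) w).2)
      = bFirst need (wc, sat) w from rfl] at this
    simpa [List.append_assoc] using this

theorem bStep_inv (need : PySem.Dict String Int) (hnd : need.keys.Nodup)
    (discount : List String) (i : Nat) (hlen : i + 10 < discount.length)
    (wc : PySem.Dict String Int) (sat ans : Int)
    (hc : ∀ x, need.contains x = true → wc.getD x 0 = wcnt discount i x)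
    (hs : sat = ↑(need.keys.countP fun x => decide (need.getD x 0 ≤ wcnt discount i x))) :
    (∀ x, need.contains x = true →
      (bStep need discount (wc, sat, ans) ((i : Int) + 10)).1.getD x 0 = wcnt discount (i+1) x) ∧
    (bStep need discount (wc, sat, ans) ((i : Int) + 10)).2.1 =
      ↑(need.keys.countP fun x => decide (need.getD x 0 ≤ wcnt discount (i+1) x)) ∧
    (bStep need discount (wc, sat, ans) ((i : Int) + 10)).2.2 =
      ans + (if okW need discount (i+1) = true then 1 else 0) := by
  have hout : PySem.List.pyGetD discount ((i : Int) + 10 - 10) "" = discount[i]'(by omega) := by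
    rw [show ((i : Int) + 10 - 10) = ((i : Nat) : Int) by ring, PySem.List.pyGetD_natCast]
    exact List.getD_eq_getElem _ _ (by omega)
  have hwin : PySem.List.pyGetD discount ((i : Int) + 10) "" = discount[i+10]'(by omega) := by
    rw [show ((i : Int) + 10) = (((i + 10 : Nat)) : Int) by push_cast; ring,
      PySem.List.pyGetD_natCast]
    exact List.getD_eq_getElem _ _ (by omega)
  unfold bStep
  rw [hout, hwin]
  dsimp only
  set out := discount[i]'(by omega) with hodef
  set wn := discount[i+10]'(by omega) with hwdef
  have hsub := sat_sub need hnd (wcnt discount i) out wc sat hc hs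
    (if need.contains out then
      (wc.insert out (wc.getD out 0 - 1),
       if wc.getD out 0 = need.getD out 0 then sat - 1 else sat)
     else (wc, sat)) rfl
  set s1 : PySem.Dict String Int × Int :=
    (if need.contains out then
      (wc.insert out (wc.getD out 0 - 1),
       if wc.getD out 0 = need.getD out 0 then sat - 1 else sat)
     else (wc, sat)) with hs1
  have hadd := sat_add need hnd (fun x => wcnt discount i x - (if out = x then 1 else 0)) wn
    s1.1 s1.2 hsub.1 hsub.2
    (if need.contains wn then
      (s1.1.insert wn (s1.1.getD wn 0 + 1),
       if (s1.1.insert wn (s1.1.getD wn 0 + 1)).getD wn 0 = need.getD wn 0 then s1.2 + 1 else s1.2)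
     else (s1.1, s1.2)) rfl
  dsimp only at hadd
  set s2 : PySem.Dict String Int × Int :=
    (if need.contains wn then
      (s1.1.insert wn (s1.1.getD wn 0 + 1),
       if (s1.1.insert wn (s1.1.getD wn 0 + 1)).getD wn 0 = need.getD wn 0 then s1.2 + 1 else s1.2)
     else (s1.1, s1.2)) with hs2
  have hw : ∀ x, wcnt discount i x - (if out = x then 1 else 0) + (if wn = x then 1 else 0)
      = wcnt discount (i+1) x := by
    intro x
    have h := wcnt_succ discount i hlen x
    rw [← hodef, ← hwdef] at h
    unfold wcnt
    by_cases e1 : out = x <;> by_cases e2 : wn = x <;> simp only [e1, e2, if_pos, if_neg] <;>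
      simp [e1, e2] at h ⊢ <;> omega
  have hC : ∀ x, need.contains x = true → s2.1.getD x 0 = wcnt discount (i+1) x := by
    intro x hx; rw [hadd.1 x hx, hw x]
  have hS : s2.2 = ↑(need.keys.countP fun x => decide (need.getD x 0 ≤ wcnt discount (i+1) x)) := by
    rw [hadd.2]; congr 1; apply List.countP_congr; intro x _
    rw [hw x]
  refine ⟨hC, hS, ?_⟩
  rw [hS]
  rcases (sat_size_iff need discount (i+1)) with hiff
  by_cases hok : okW need discount (i+1) = true
  · rw [if_pos hok, if_pos (hiff.mpr hok)]
  · rw [if_neg hok, if_neg (fun e => hok (hiff.mp e)), add_zero]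

theorem main_inv (need : PySem.Dict String Int) (hnd : need.keys.Nodup)
    (discount : List String) (t : Nat) (hlen : 10 + t ≤ discount.length) :
    ∀ (wc : PySem.Dict String Int) (sat ans : Int),
    (∀ x, need.contains x = true → wc.getD x 0 = wcnt discount 0 x) →
    sat = ↑(need.keys.countP fun x => decide (need.getD x 0 ≤ wcnt discount 0 x)) →
    (∀ x, need.contains x = true →
      ((PySem.List.pyRange 10 (10 + (t : Int)) 1).foldl (bStep need discount) (wc, sat, ans)).1.getD x 0
        = wcnt discount t x) ∧
    ((PySem.List.pyRange 10 (10 + (t : Int)) 1).foldl (bStep need discount) (wc, sat, ans)).2.1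
      = ↑(need.keys.countP fun x => decide (need.getD x 0 ≤ wcnt discount t x)) ∧
    ((PySem.List.pyRange 10 (10 + (t : Int)) 1).foldl (bStep need discount) (wc, sat, ans)).2.2
      = ans + ↑((List.range t).countP fun r => okW need discount (r+1)) := by
  induction t with
  | zero =>
    intro wc sat ans hc hs
    rw [show ((10 : Int) + (0 : Nat)) = 10 by norm_num, PySem.List.pyRange_one_eq_nil (le_refl _)]
    simpa using ⟨hc, hs⟩
  | succ t ih =>
    intro wc sat ans hc hs
    have h10 : (10 : Int) ≤ 10 + (t : Int) := by omega
    rw [show ((10 : Int) + ((t + 1 : Nat) : Int)) = (10 + (t : Int)) + 1 by push_cast; ring,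
      PySem.List.pyRange_one_succ_right h10, List.foldl_append, List.foldl_cons, List.foldl_nil]
    obtain ⟨ihc, ihs, iha⟩ := ih (by omega) wc sat ans hc hs
    set s := (PySem.List.pyRange 10 (10 + (t : Int)) 1).foldl (bStep need discount) (wc, sat, ans)
      with hsdef
    have hstep := bStep_inv need hnd discount t (by omega) s.1 s.2.1 s.2.2 ihc ihs
    rw [show ((s.1, s.2.1, s.2.2) : PySem.Dict String Int × Int × Int) = s from rfl] at hstep
    rw [show ((10 : Int) + (t : Int)) = ((t : Int) + 10) by ring]
    refine ⟨hstep.1, hstep.2.1, ?_⟩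
    rw [hstep.2.2, iha, List.range_succ, List.countP_append]
    simp only [List.countP_cons, List.countP_nil]
    by_cases hok : okW need discount (t+1) = true <;> simp [hok] <;> push_cast <;> ring

theorem alt_eq (want : List String) (number : List Int) (discount : List String) :
    solution_alt want number discount =
      ((List.range (((discount.length : Int) - 9).toNat)).countP
        (okW (bNeed want number) discount) : Int) := by
  unfold solution_alt
  dsimp only
  by_cases hlt : (discount.length : Int) < 10
  · rw [if_pos hlt, show ((discount.length : Int) - 9).toNat = 0 by omega]
    simp
  · rw [if_neg hlt]
    have hlen : 10 ≤ discount.length := by exact_mod_cast not_lt.mp hlt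
    set need := bNeed want number with hneed
    have hnd : need.keys.Nodup := bNeed_nodup want number
    have hpos : ∀ x, need.contains x = true → 1 ≤ need.getD x 0 := bNeed_pos want number
    have hsl : PySem.List.slice discount none (some 10) = discount.take 10 := by
      rw [PySem.List.slice_to discount (by norm_num)]
      rfl
    rw [hsl]
    have hfirst := bFirst_inv need hnd (discount.take 10) [] PySem.Dict.empty 0
      (fun x _ => by simp [PySem.Dict.getD_empty])
      (by
        have hz : (List.countP
            (fun x => decide (need.getD x 0 ≤ ((([] : List String).count x : Nat) : Int)))
            need.keys) = 0 := List.countP_eq_zero.mpr (fun x hx => by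
          have := hpos x ((PySem.Dict.contains_iff_mem_keys _ x).mpr hx)
          simp only [List.count_nil, decide_eq_true_eq]
          omega)
        rw [hz]
        simp)
    rw [List.nil_append] at hfirst
    have hw0 : ∀ x, ((discount.take 10).count x : Int) = wcnt discount 0 x := by
      intro x; unfold wcnt; rw [List.drop_zero]
    have hc0 : ∀ x, need.contains x = true →
        ((discount.take 10).foldl (bFirst need) (PySem.Dict.empty, 0)).1.getD x 0
          = wcnt discount 0 x := by
      intro x hx; rw [hfirst.1 x hx, hw0 x]
    have hs0 : ((discount.take 10).foldl (bFirst need) (PySem.Dict.empty, 0)).2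
        = ↑(need.keys.countP fun x => decide (need.getD x 0 ≤ wcnt discount 0 x)) := by
      rw [hfirst.2]; congr 1
    set s0 := (discount.take 10).foldl (bFirst need) (PySem.Dict.empty, 0) with hs0def
    set ans0 : Int := if s0.2 = (need.size : Int) then 1 else 0 with hans0
    have hrange : ((discount.length : Int)) = 10 + ((discount.length - 10 : Nat) : Int) := by
      push_cast; omega
    rw [hrange]
    obtain ⟨_, _, hA⟩ := main_inv need hnd discount (discount.length - 10)
      (by omega) s0.1 s0.2 ans0 hc0 hs0
    rw [hA]
    have hM : ((10 : Int) + ((discount.length - 10 : Nat) : Int) - 9).toNat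
        = (discount.length - 10) + 1 := by omega
    rw [hM, List.range_succ_eq_map, List.countP_cons, List.countP_map]
    have hcomp : (okW need discount ∘ Nat.succ) = fun r => okW need discount (r + 1) := by
      funext r; simp [Function.comp, Nat.succ_eq_add_one]
    rw [hcomp]
    have hiff := sat_size_iff need discount 0
    rw [← hs0] at hiff
    by_cases hok : okW need discount 0 = true
    · rw [hans0, if_pos (hiff.mpr hok)]
      simp only [hok, decide_true, if_pos]
      push_cast; ring
    · rw [hans0, if_neg (fun e => hok (hiff.mp e))]
      simp only [hok, decide_false]
      push_cast; simp

-- ===== VERDICT (by name: the statement is the Claim_ definition above) =====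
theorem solution_spec : Claim_equal_solution := by
  intro want number discount _ hpre
  unfold Spec_solution
  rw [solution_eq want number discount hpre, alt_eq]
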